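-- pv_equiv track=rewrite | github.com/adinunzio10/rd-watch | log_cleaner.py | add_summary
-- ===== SOURCE A (Python) =====
-- def add_summary(cleaned_text: str) -> str:
--     """Add a summary section at the beginning."""
--     lines = cleaned_text.split('\n')
--
--     # Extract key information
--     season_selections = [l for l in lines if 'Season Selection' in l or 'Selecting season' in l]
--     api_calls = [l for l in lines if 'API CALL:' in l]
--     errors = [l for l in lines if 'Error' in l or 'WARNING' in l or 'WARN' in l]
--
--     summary = ["=== LOG SUMMARY ==="]
--     summary.append(f"Total lines after cleanup: {len(lines)}")
--     summary.append(f"Season selections: {len(season_selections)}")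
--     summary.append(f"API calls: {len(api_calls)}")
--     summary.append(f"Errors/Warnings: {len(errors)}")
--     summary.append("")
--
--     if errors:
--         summary.append("=== ERRORS/WARNINGS ===")
--         for error in errors[:5]:  # Show first 5 errors
--             summary.append(error)
--         if len(errors) > 5:
--             summary.append(f"... and {len(errors) - 5} more errors")
--         summary.append("")
--
--     summary.append("=== CLEANED LOG DATA ===")
--     summary.append("")
--
--     return '\n'.join(summary) + cleaned_text
-- ===== SOURCE B (Python) =====
-- def add_summary(cleaned_text: str) -> str:
--     """Add a summary section at the beginning (single pass over lines)."""
--     total = 0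
--     seasons = 0
--     apis = 0
--     nerr = 0
--     first5 = []
--     for line in cleaned_text.split('\n'):
--         total += 1
--         if 'Season Selection' in line or 'Selecting season' in line:
--             seasons += 1
--         if 'API CALL:' in line:
--             apis += 1
--         if 'Error' in line or 'WARNING' in line or 'WARN' in line:
--             nerr += 1
--             if len(first5) < 5:
--                 first5.append(line)
--     out = "=== LOG SUMMARY ===\n"
--     out += f"Total lines after cleanup: {total}\n"
--     out += f"Season selections: {seasons}\n"
--     out += f"API calls: {apis}\n"
--     out += f"Errors/Warnings: {nerr}\n\n"
--     if nerr:
--         out += "=== ERRORS/WARNINGS ===\n"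
--         out += ''.join(e + '\n' for e in first5)
--         if nerr > 5:
--             out += f"... and {nerr - 5} more errors\n"
--         out += "\n"
--     out += "=== CLEANED LOG DATA ===\n"
--     return out + cleaned_text
-- ===== Notes on version B (the rewrite author's own statement) =====
-- stated objective: alternative
-- what changed: Replaces A's three full filtering passes plus list-of-lines join with a single fold over the lines that maintains counters and only the first five error lines, then emits the report by direct string concatenation.
import Mathlib
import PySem

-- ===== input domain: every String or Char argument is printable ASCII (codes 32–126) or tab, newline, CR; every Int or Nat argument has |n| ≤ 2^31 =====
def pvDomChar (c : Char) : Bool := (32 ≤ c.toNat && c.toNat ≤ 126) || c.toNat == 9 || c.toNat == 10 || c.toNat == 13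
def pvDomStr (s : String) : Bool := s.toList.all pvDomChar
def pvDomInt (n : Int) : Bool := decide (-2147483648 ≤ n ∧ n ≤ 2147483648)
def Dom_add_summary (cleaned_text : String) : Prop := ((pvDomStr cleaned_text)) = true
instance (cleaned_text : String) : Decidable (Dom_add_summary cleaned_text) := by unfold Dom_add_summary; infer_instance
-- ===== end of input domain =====

-- B rebuilds the report in a single pass over the lines (counters + first five errors) instead of A's three full filtering passes; objective: alternative decomposition.

-- ===== PORT A =====
def add_summary (cleaned_text : String) : String :=
  let lines := (PySem.Str.split? cleaned_text "\n").getD []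
  let season_selections := lines.filter (fun l =>
    PySem.Str.isIn "Season Selection" l || PySem.Str.isIn "Selecting season" l)
  let api_calls := lines.filter (fun l => PySem.Str.isIn "API CALL:" l)
  let errors := lines.filter (fun l =>
    PySem.Str.isIn "Error" l || PySem.Str.isIn "WARNING" l || PySem.Str.isIn "WARN" l)
  let summary : List String := ["=== LOG SUMMARY ==="]
  let summary := summary ++ ["Total lines after cleanup: " ++ PySem.Int.toStr (lines.length : Int)]
  let summary := summary ++ ["Season selections: " ++ PySem.Int.toStr (season_selections.length : Int)]
  let summary := summary ++ ["API calls: " ++ PySem.Int.toStr (api_calls.length : Int)]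
  let summary := summary ++ ["Errors/Warnings: " ++ PySem.Int.toStr (errors.length : Int)]
  let summary := summary ++ [""]
  let summary :=
    if errors ≠ [] then
      let summary := summary ++ ["=== ERRORS/WARNINGS ==="]
      let summary := (PySem.List.slice errors none (some 5)).foldl (fun acc e => acc ++ [e]) summary
      let summary :=
        if errors.length > 5 then
          summary ++ ["... and " ++ PySem.Int.toStr ((errors.length : Int) - 5) ++ " more errors"]
        else summary
      summary ++ [""]
    else summary
  let summary := summary ++ ["=== CLEANED LOG DATA ==="]
  let summary := summary ++ [""]
  PySem.Str.join "\n" summary ++ cleaned_text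

-- ===== PORT B =====
def add_summary_alt (cleaned_text : String) : String :=
  let st := ((PySem.Str.split? cleaned_text "\n").getD []).foldl
    (fun (st : Int × Int × Int × Int × List String) line =>
      let total := st.1 + 1
      let seasons :=
        if PySem.Str.isIn "Season Selection" line || PySem.Str.isIn "Selecting season" line
        then st.2.1 + 1 else st.2.1
      let apis := if PySem.Str.isIn "API CALL:" line then st.2.2.1 + 1 else st.2.2.1
      if PySem.Str.isIn "Error" line || PySem.Str.isIn "WARNING" line || PySem.Str.isIn "WARN" line then
        (total, seasons, apis, st.2.2.2.1 + 1,
          if st.2.2.2.2.length < 5 then st.2.2.2.2 ++ [line] else st.2.2.2.2)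
      else (total, seasons, apis, st.2.2.2.1, st.2.2.2.2))
    (0, 0, 0, 0, [])
  let out := "=== LOG SUMMARY ===\n"
  let out := out ++ "Total lines after cleanup: " ++ PySem.Int.toStr st.1 ++ "\n"
  let out := out ++ "Season selections: " ++ PySem.Int.toStr st.2.1 ++ "\n"
  let out := out ++ "API calls: " ++ PySem.Int.toStr st.2.2.1 ++ "\n"
  let out := out ++ "Errors/Warnings: " ++ PySem.Int.toStr st.2.2.2.1 ++ "\n\n"
  let out :=
    if st.2.2.2.1 ≠ 0 then
      let out := out ++ "=== ERRORS/WARNINGS ===\n"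
      let out := out ++ PySem.Str.join "" (st.2.2.2.2.map (fun e => e ++ "\n"))
      let out :=
        if st.2.2.2.1 > 5 then
          out ++ "... and " ++ PySem.Int.toStr (st.2.2.2.1 - 5) ++ " more errors\n"
        else out
      out ++ "\n"
    else out
  out ++ "=== CLEANED LOG DATA ===\n" ++ cleaned_text

-- ===== PRECONDITION & SPEC =====
def Spec_add_summary (cleaned_text : String) (out : String) : Prop := out = add_summary_alt cleaned_text
instance (cleaned_text : String) (out : String) : Decidable (Spec_add_summary cleaned_text out) := by unfold Spec_add_summary; infer_instance

-- ===== CLAIM (what is proved, stated in full; the proofs are below) =====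
def Claim_equal_add_summary : Prop := ∀ (cleaned_text : String), Dom_add_summary cleaned_text → Spec_add_summary cleaned_text (add_summary cleaned_text)

-- ===== LEMMAS AND PROOFS =====

-- loop-shape lemma: B's single pass computes the three counts and the first five error lines
lemma pvLoop (lines : List String) (t s a e : Int) (f5 : List String) (h : f5.length ≤ 5) :
    lines.foldl
      (fun (st : Int × Int × Int × Int × List String) line =>
        let total := st.1 + 1
        let seasons :=
          if PySem.Str.isIn "Season Selection" line || PySem.Str.isIn "Selecting season" line
          then st.2.1 + 1 else st.2.1
        let apis := if PySem.Str.isIn "API CALL:" line then st.2.2.1 + 1 else st.2.2.1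
        if PySem.Str.isIn "Error" line || PySem.Str.isIn "WARNING" line || PySem.Str.isIn "WARN" line then
          (total, seasons, apis, st.2.2.2.1 + 1,
            if st.2.2.2.2.length < 5 then st.2.2.2.2 ++ [line] else st.2.2.2.2)
        else (total, seasons, apis, st.2.2.2.1, st.2.2.2.2))
      (t, s, a, e, f5)
    = (t + lines.length,
       s + lines.countP (fun l => PySem.Str.isIn "Season Selection" l || PySem.Str.isIn "Selecting season" l),
       a + lines.countP (fun l => PySem.Str.isIn "API CALL:" l),
       e + lines.countP (fun l => PySem.Str.isIn "Error" l || PySem.Str.isIn "WARNING" l || PySem.Str.isIn "WARN" l),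
       (f5 ++ lines.filter (fun l => PySem.Str.isIn "Error" l || PySem.Str.isIn "WARNING" l || PySem.Str.isIn "WARN" l)).take 5) := by
  induction lines generalizing t s a e f5 with
  | nil => simp [List.take_of_length_le h]
  | cons x xs ih =>
    rw [List.foldl_cons]
    by_cases h3 : (PySem.Str.isIn "Error" x || PySem.Str.isIn "WARNING" x || PySem.Str.isIn "WARN" x) = true
    · by_cases h5 : f5.length < 5
      · rw [if_pos h3]
        simp only [if_pos h5]
        rw [ih _ _ _ _ _ (by simp; omega)]
        clear ih
        simp at h3
        simp [h3, List.countP_cons, Prod.ext_iff]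
        repeat' apply And.intro
        all_goals try (split_ifs <;> (try simp_all) <;> omega)
        all_goals try omega
      · rw [if_pos h3]
        simp only [if_neg h5]
        rw [ih _ _ _ _ _ h]
        clear ih
        have h5' : f5.length = 5 := by omega
        simp at h3
        simp [h3, List.countP_cons, Prod.ext_iff]
        repeat' apply And.intro
        all_goals try (split_ifs <;> (try simp_all) <;> omega)
        all_goals try omega
        rw [List.take_append_of_le_length (by omega), List.take_append_of_le_length (by omega)]
    · rw [if_neg h3]
      rw [ih _ _ _ _ _ h]
      clear ih
      simp at h3
      simp [h3, List.countP_cons, Prod.ext_iff]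
      repeat' apply And.intro
      all_goals try (split_ifs <;> (try simp_all) <;> omega)
      all_goals try omega

lemma pvFoldlApp (l acc : List String) : l.foldl (fun acc e => acc ++ [e]) acc = acc ++ l := by
  simpa using PySem.List.foldl_append_singleton_eq_map id l acc

lemma pvJoin_cons (x y : String) (l : List String) :
    PySem.Str.join "\n" (x :: y :: l) = x ++ "\n" ++ PySem.Str.join "\n" (y :: l) := by
  rw [← String.toList_inj]
  simp [PySem.Str.toList_join, PySem.Chars.join_cons_cons]

lemma pvJoin_single (x : String) : PySem.Str.join "\n" [x] = x := by
  rw [← String.toList_inj]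
  simp [PySem.Str.toList_join, PySem.Chars.join_singleton]

lemma pvJoin_append (xs ys : List String) (hxs : xs ≠ []) (hys : ys ≠ []) :
    PySem.Str.join "\n" (xs ++ ys) = PySem.Str.join "\n" xs ++ "\n" ++ PySem.Str.join "\n" ys := by
  induction xs with
  | nil => exact absurd rfl hxs
  | cons x xs ih =>
    cases xs with
    | nil =>
      cases ys with
      | nil => exact absurd rfl hys
      | cons y ys => simp [pvJoin_cons, pvJoin_single]
    | cons x' xs' =>
      have := ih (by simp)
      rw [List.cons_append, List.cons_append, pvJoin_cons x x' (xs' ++ ys),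
        ← List.cons_append, this, pvJoin_cons]
      simp [String.append_assoc]

lemma pvJoin0 (E : List String) (h : E ≠ []) :
    PySem.Str.join "" (E.map (fun e => e ++ "\n")) = PySem.Str.join "\n" E ++ "\n" := by
  induction E with
  | nil => exact absurd rfl h
  | cons x xs ih =>
    cases xs with
    | nil =>
      rw [← String.toList_inj]
      simp [PySem.Str.toList_join, PySem.Chars.join_singleton]
    | cons y ys =>
      rw [List.map_cons, ← String.toList_inj] at *
      simp [PySem.Str.toList_join, PySem.Chars.join_cons_cons] at *
      simp [ih]

lemma pvJoin_cons' (x : String) (l : List String) (h : l ≠ []) :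
    PySem.Str.join "\n" (x :: l) = x ++ "\n" ++ PySem.Str.join "\n" l := by
  cases l with
  | nil => exact absurd rfl h
  | cons y ys => exact pvJoin_cons x y ys

set_option maxRecDepth 8192 in
theorem add_summary_spec : Claim_equal_add_summary := by
  intro ct _
  unfold Spec_add_summary add_summary add_summary_alt
  rw [pvLoop _ 0 0 0 0 [] (by simp)]
  simp only [zero_add, List.countP_eq_length_filter, List.nil_append]
  rw [PySem.List.slice_to _ (by norm_num), pvFoldlApp]
  set lines := (PySem.Str.split? ct "\n").getD [] with hlines
  set errors := lines.filter (fun l => PySem.Str.isIn "Error" l || PySem.Str.isIn "WARNING" l || PySem.Str.isIn "WARN" l) with herrdef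
  by_cases herr : errors = []
  · simp only [herr, List.length_nil]
    rw [if_neg (by simp), if_neg (by simp)]
    simp only [List.cons_append, List.nil_append]
    rw [pvJoin_cons, pvJoin_cons, pvJoin_cons, pvJoin_cons, pvJoin_cons, pvJoin_cons, pvJoin_cons, pvJoin_single]
    rw [← String.toList_inj]
    simp
  · have hlen : errors.length ≠ 0 := by simpa [List.length_eq_zero_iff] using herr
    have hlenZ : ((errors.length : Int)) ≠ 0 := by exact_mod_cast hlen
    rw [if_pos herr, if_pos hlenZ]
    have htake : (errors.take 5) ≠ [] := by
      rw [Ne, List.take_eq_nil_iff]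
      push Not
      exact ⟨by omega, herr⟩
    rw [pvJoin0 _ htake]
    by_cases h5 : errors.length > 5
    · have h5Z : ((errors.length : Int)) > 5 := by exact_mod_cast h5
      rw [if_pos h5, if_pos h5Z]
      simp only [List.append_assoc, List.cons_append, List.nil_append]
      rw [show List.take (Int.toNat 5) errors = List.take 5 errors from rfl]
      rw [pvJoin_cons' _ _ (by simp), pvJoin_cons' _ _ (by simp), pvJoin_cons' _ _ (by simp),
        pvJoin_cons' _ _ (by simp), pvJoin_cons' _ _ (by simp), pvJoin_cons' _ _ (by simp),
        pvJoin_cons' _ _ (by simp),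
        pvJoin_append _ _ htake (by simp),
        pvJoin_cons, pvJoin_cons, pvJoin_cons, pvJoin_single]
      rw [← String.toList_inj]
      simp
    · have h5Z : ¬ ((errors.length : Int)) > 5 := by exact_mod_cast h5
      rw [if_neg h5, if_neg h5Z]
      simp only [List.append_assoc, List.cons_append, List.nil_append]
      rw [show List.take (Int.toNat 5) errors = List.take 5 errors from rfl]
      rw [pvJoin_cons' _ _ (by simp), pvJoin_cons' _ _ (by simp), pvJoin_cons' _ _ (by simp),
        pvJoin_cons' _ _ (by simp), pvJoin_cons' _ _ (by simp), pvJoin_cons' _ _ (by simp),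
        pvJoin_cons' _ _ (by simp),
        pvJoin_append _ _ htake (by simp),
        pvJoin_cons, pvJoin_cons, pvJoin_single]
      rw [← String.toList_inj]
      simp
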